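-- pv_equiv track=rewrite | github.com/stankv/Studing | 2_odometer.py | odometer
-- ===== SOURCE A (Python) =====
-- def odometer(N):
--     time = 0
--     time1 = 0
--     S = 0
--     count = 0
--     for i in range(len(N)):
--         if i % 2 == 0:
--             velocity = N[i]
--         else:
--             time = N[i] - time1
--             time1 = N[i]
--         count = count + 1
--         if count % 2 == 0 and count != 0:
--             S = S + velocity * time
--     return S
-- ===== SOURCE B (Python) =====
-- def odometer(N):
--     velocities = [x for i, x in enumerate(N) if i % 2 == 0]
--     times = [x for i, x in enumerate(N) if i % 2 == 1]
--     deltas = [t - p for t, p in zip(times, [0] + times[:-1])]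
--     return sum(v * d for v, d in zip(velocities, deltas))
-- ===== Notes on version B (the rewrite author's own statement) =====
-- stated objective: simpler
-- what changed: Replaces A's stateful single loop (five mutable variables with parity bookkeeping) by a declarative decomposition: split N into velocity and time tables, form the table of time deltas against a 0-prepended shifted copy, and return the zip dot product; zip truncation handles odd-length input.
import Mathlib
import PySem

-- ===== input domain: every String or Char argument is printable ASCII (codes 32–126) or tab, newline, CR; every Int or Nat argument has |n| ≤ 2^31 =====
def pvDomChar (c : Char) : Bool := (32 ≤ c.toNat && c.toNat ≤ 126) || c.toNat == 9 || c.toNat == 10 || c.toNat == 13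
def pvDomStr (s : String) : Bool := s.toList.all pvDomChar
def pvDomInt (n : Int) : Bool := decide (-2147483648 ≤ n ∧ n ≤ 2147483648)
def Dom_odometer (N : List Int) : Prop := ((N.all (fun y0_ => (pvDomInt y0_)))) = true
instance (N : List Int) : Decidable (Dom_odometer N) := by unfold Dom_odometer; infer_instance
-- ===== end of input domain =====

-- B replaces A's stateful parity-tracking loop by split-into-tables (velocities, times, time deltas) and a zip dot product; objective: simpler.


-- ===== PORT A =====
-- loop body of A's for-loop; state (time, time1, S, count, velocity), input (i, N[i]).
-- Python's `velocity` starts unbound but is always assigned (at i = 0) before its first read; we initialise it (and time/time1/S/count as in A) to 0.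
def odometerStep : (Int × Int × Int × Int × Int) → (Int × Int) → (Int × Int × Int × Int × Int) :=
  fun (time, time1, S, count, velocity) (i, x) =>
    let (time, time1, velocity) :=
      if PySem.Int.mod i 2 = 0 then (time, time1, x)
      else (x - time1, x, velocity)
    let count := count + 1
    let S := if PySem.Int.mod count 2 = 0 ∧ count ≠ 0 then S + velocity * time else S
    (time, time1, S, count, velocity)

def odometer (N : List Int) : Int :=
  ((PySem.List.pyRange 0 (N.length) 1).foldl
    (fun st i => odometerStep st (i, PySem.List.pyGetD N i 0))
    (0, 0, 0, 0, 0)).2.2.1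

-- ===== PORT B =====
def odometer_alt (N : List Int) : Int :=
  let velocities := ((PySem.List.enumerate N 0).filter (fun p => PySem.Int.mod p.1 2 == 0)).map (fun p => p.2)
  let times := ((PySem.List.enumerate N 0).filter (fun p => PySem.Int.mod p.1 2 == 1)).map (fun p => p.2)
  let deltas := (times.zip (0 :: PySem.List.slice times none (some (-1)))).map (fun p => p.1 - p.2)
  ((velocities.zip deltas).map (fun p => p.1 * p.2)).sum

-- ===== PRECONDITION & SPEC =====
def Spec_odometer (N : List Int) (out : Int) : Prop := out = odometer_alt N
instance (N : List Int) (out : Int) : Decidable (Spec_odometer N out) := by unfold Spec_odometer; infer_instance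

-- ===== CLAIM (what is proved, stated in full; the proofs are below) =====
def Claim_equal_odometer : Prop := ∀ (N : List Int), Dom_odometer N → Spec_odometer N (odometer N)

-- ===== LEMMAS AND PROOFS =====

-- common value of both programs: sum of velocity * (time delta) over complete (velocity, time) pairs, prev running time
def g : List Int → Int → Int
  | [], _ => 0
  | [_], _ => 0
  | v :: t :: r, prev => v * (t - prev) + g r t

-- every second element, starting with the head
def evens : List Int → List Int
  | [] => []
  | [x] => [x]
  | x :: _ :: r => x :: evens r

theorem evens_cons (t : Int) (rest : List Int) : evens (t :: rest) = t :: evens rest.tail := by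
  cases rest <;> simp [evens]

theorem mod2 (a : Int) : PySem.Int.mod a 2 = a % 2 :=
  PySem.Int.mod_eq_emod_of_pos (by norm_num)

theorem twoStepInduction {P : List Int → Prop} (h0 : P []) (h1 : ∀ v, P [v])
    (h2 : ∀ v t r, P r → P (v :: t :: r)) : ∀ N, P N
  | [] => h0
  | [v] => h1 v
  | v :: t :: r => h2 v t r (twoStepInduction h0 h1 h2 r)

theorem lemA : ∀ (r : List Int) (c time time1 S vel : Int), 0 ≤ c → c % 2 = 0 →
    (List.foldl odometerStep (time, time1, S, c, vel) (PySem.List.enumerate r c)).2.2.1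
      = S + g r time1 := by
  intro r
  induction r using twoStepInduction with
  | h0 =>
    intro c time time1 S vel hc he
    simp [PySem.List.enumerate_nil, g]
  | h1 v =>
    intro c time time1 S vel hc he
    have e1 : (c + 1) % 2 = 1 := by omega
    simp [PySem.List.enumerate_cons, PySem.List.enumerate_nil, odometerStep, he, e1, g]
  | h2 v t r IH =>
    intro c time time1 S vel hc he
    have e1 : (c + 1) % 2 = 1 := by omega
    have e2 : (c + 1 + 1) % 2 = 0 := by omega
    have e3 : c + 1 + 1 ≠ 0 := by omega
    simp [PySem.List.enumerate_cons, List.foldl_cons, odometerStep, he, e1, e2, e3]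
    rw [IH (c + 1 + 1) (t - time1) t (S + v * (t - time1)) v (by omega) (by omega)]
    simp [g]
    ring

theorem odometer_eq_g (N : List Int) : odometer N = g N 0 := by
  have hm := PySem.List.enumerate_eq_map_pyRange (xs := N) (0 : Int)
  have h1 : odometer N = (List.foldl odometerStep (0, 0, 0, 0, 0) (PySem.List.enumerate N 0)).2.2.1 := by
    unfold odometer
    rw [hm, List.foldl_map]
    rfl
  rw [h1]
  simpa using lemA N 0 0 0 0 0 (by norm_num) (by norm_num)

theorem filters_eq : ∀ (r : List Int) (c : Int), 0 ≤ c → c % 2 = 0 →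
    (((PySem.List.enumerate r c).filter (fun p => PySem.Int.mod p.1 2 == 0)).map (fun p => p.2) = evens r) ∧
    (((PySem.List.enumerate r c).filter (fun p => PySem.Int.mod p.1 2 == 1)).map (fun p => p.2) = evens r.tail) := by
  intro r
  induction r using twoStepInduction with
  | h0 =>
    intro c hc he
    simp [PySem.List.enumerate_nil, evens]
  | h1 v =>
    intro c hc he
    simp [PySem.List.enumerate_cons, PySem.List.enumerate_nil, he, evens]
  | h2 v t r IH =>
    intro c hc he
    have e1 : (c + 1) % 2 = 1 := by omega
    obtain ⟨ih0, ih1⟩ := IH (c + 1 + 1) (by omega) (by omega)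
    simp only [mod2] at ih0 ih1
    simp [PySem.List.enumerate_cons, he, e1, evens, evens_cons, ih0, ih1]

theorem lemB : ∀ (r : List Int) (prev : Int),
    (((evens r).zip (((evens r.tail).zip (prev :: (evens r.tail).dropLast)).map
        (fun p => p.1 - p.2))).map (fun p => p.1 * p.2)).sum = g r prev := by
  intro r
  induction r using twoStepInduction with
  | h0 => intro prev; simp [evens, g]
  | h1 v => intro prev; simp [evens, g]
  | h2 v t r IH =>
    intro prev
    rcases r with _ | ⟨x, _ | ⟨y, r'⟩⟩
    · simp [evens, g]
    · simp [evens, g]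
    · have hx := IH t
      simp [evens, evens_cons] at hx ⊢
      rw [hx]
      simp [g]

theorem alt_eq_g (N : List Int) : odometer_alt N = g N 0 := by
  obtain ⟨h1, h2⟩ := filters_eq N 0 (by norm_num) (by norm_num)
  unfold odometer_alt
  simp only [h1, h2, PySem.List.slice_to_neg_one]
  exact lemB N 0

-- ===== VERDICT (by name: the statement is the Claim_ definition above) =====
theorem odometer_spec : Claim_equal_odometer := by
  intro N _hD
  unfold Spec_odometer
  rw [odometer_eq_g, alt_eq_g]
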